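-- pv_equiv track=rewrite | github.com/Chenwei-1999/Sparse_Video_Understanding | examples/revise/plug_and_play_nextqa_vllm.py | _indices_to_intervals
-- ===== SOURCE A (Python) =====
-- def _indices_to_intervals(indices: list[int]) -> list[tuple[int, int]]:
--     """Convert a list of indices to inclusive [start, end] intervals."""
--     if not indices:
--         return []
--     sorted_unique = sorted({int(i) for i in indices})
--     intervals: list[tuple[int, int]] = []
--     start = prev = sorted_unique[0]
--     for idx in sorted_unique[1:]:
--         if idx == prev + 1:
--             prev = idx
--             continue
--         intervals.append((start, prev))
--         start = prev = idx
--     intervals.append((start, prev))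
--     return intervals
-- ===== SOURCE B (Python) =====
-- def _indices_to_intervals(indices: list[int]) -> list[tuple[int, int]]:
--     """Convert a list of indices to inclusive [start, end] intervals."""
--     su = sorted({int(i) for i in indices})
--     if not su:
--         return []
--     breaks = [(a, b) for a, b in zip(su, su[1:]) if b != a + 1]
--     starts = [su[0]] + [b for _, b in breaks]
--     ends = [a for a, _ in breaks] + [su[-1]]
--     return list(zip(starts, ends))
-- ===== Notes on version B (the rewrite author's own statement) =====
-- stated objective: alternative
-- what changed: Replaces A's running start/prev merge loop with a boundary-detection pass: zip the sorted unique list with its shifted self to find break points, build the starts and ends lists from them, and zip those into intervals.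
import Mathlib
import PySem

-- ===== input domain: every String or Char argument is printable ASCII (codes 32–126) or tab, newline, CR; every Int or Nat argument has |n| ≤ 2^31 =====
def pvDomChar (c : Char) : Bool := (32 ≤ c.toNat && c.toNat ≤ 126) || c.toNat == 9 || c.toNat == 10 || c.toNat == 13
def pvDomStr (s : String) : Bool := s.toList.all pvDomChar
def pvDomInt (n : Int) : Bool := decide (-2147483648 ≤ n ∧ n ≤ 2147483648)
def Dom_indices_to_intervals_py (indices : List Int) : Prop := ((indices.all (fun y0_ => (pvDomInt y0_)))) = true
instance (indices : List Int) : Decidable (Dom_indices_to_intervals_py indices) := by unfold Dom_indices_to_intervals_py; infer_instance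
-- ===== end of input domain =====

-- B replaces A's running start/prev merge loop with a boundary-detection pass
-- (zip the sorted unique list with its shifted self, collect break pairs, zip
-- starts with ends); alternative decomposition, same asymptotic cost.

-- ===== PORT A =====
-- the for-loop of A over sorted_unique[1:] with state (intervals, start, prev)
def aLoop : List Int → List (Int × Int) → Int → Int → List (Int × Int)
  | [], intervals, start, prev => intervals ++ [(start, prev)]
  | idx :: rest, intervals, start, prev =>
    if idx = prev + 1 then aLoop rest intervals start idx
    else aLoop rest (intervals ++ [(start, prev)]) idx idx

def indices_to_intervals_py (indices : List Int) : List (Int × Int) :=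
  if indices = [] then []
  else
    match PySem.List.sorted (PySem.Set.ofList indices) (fun x => x) false with
    | [] => []  -- unreachable: sorted_unique of a nonempty list is nonempty
    | h :: t => aLoop t [] h h

-- ===== PORT B =====
def indices_to_intervals_py_alt (indices : List Int) : List (Int × Int) :=
  match PySem.List.sorted (PySem.Set.ofList indices) (fun x => x) false with
  | [] => []  -- 'if not su: return []'
  | h :: t =>
    -- zip(su, su[1:]) = zip (h :: t) t; su[0] = h; su[-1] = last of h :: t
    let breaks := (List.zip (h :: t) t).filter (fun p => p.2 != p.1 + 1)
    let starts := h :: breaks.map (·.2)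
    let ends := breaks.map (·.1) ++ [(h :: t).getLast (List.cons_ne_nil h t)]
    List.zip starts ends

-- ===== PRECONDITION & SPEC =====
def Spec_indices_to_intervals_py (indices : List Int) (out : List (Int × Int)) : Prop := out = indices_to_intervals_py_alt indices
instance (indices : List Int) (out : List (Int × Int)) : Decidable (Spec_indices_to_intervals_py indices out) := by unfold Spec_indices_to_intervals_py; infer_instance

-- ===== CLAIM (what is proved, stated in full; the proofs are below) =====
def Claim_equal_indices_to_intervals_py : Prop := ∀ (indices : List Int), Dom_indices_to_intervals_py indices → Spec_indices_to_intervals_py indices (indices_to_intervals_py indices)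

-- ===== LEMMAS AND PROOFS =====

-- canonical recursive form of the interval grouping, used to bridge A and B
def runs : Int → Int → List Int → List (Int × Int)
  | s, p, [] => [(s, p)]
  | s, p, x :: xs => if x = p + 1 then runs s x xs else (s, p) :: runs x x xs

theorem aLoop_eq_runs : ∀ (xs : List Int) (acc : List (Int × Int)) (s p : Int),
    aLoop xs acc s p = acc ++ runs s p xs := by
  intro xs
  induction xs with
  | nil => intro acc s p; simp [aLoop, runs]
  | cons x xs ih =>
    intro acc s p
    simp only [aLoop, runs]
    split_ifs with h
    · exact ih acc s x
    · rw [ih (acc ++ [(s, p)]) x x]; simp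

-- changing only the pending start changes only the first emitted pair's fst
theorem runs_start : ∀ (xs : List Int) (s p : Int),
    runs s p xs = (s, ((runs p p xs).headD (0, 0)).2) :: (runs p p xs).tail := by
  intro xs
  induction xs with
  | nil => intro s p; simp [runs]
  | cons x xs ih =>
    intro s p
    simp only [runs]
    split_ifs with h
    · rw [ih s x, ih p x]; simp
    · simp

theorem zip_head_swap (t' : List Int) (e h x : Int) (E' M2 : List Int)
    (hx : List.zip (x :: M2) (e :: E') = runs x x t') :
    List.zip (h :: M2) (e :: E') = runs h x t' := by
  rw [runs_start t' h x, ← hx]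
  simp [List.zip]

theorem b_eq_runs : ∀ (t : List Int) (h : Int),
    List.zip (h :: (((List.zip (h :: t) t).filter (fun p => p.2 != p.1 + 1)).map (·.2)))
      ((((List.zip (h :: t) t).filter (fun p => p.2 != p.1 + 1)).map (·.1)) ++
        [(h :: t).getLast (List.cons_ne_nil h t)]) = runs h h t := by
  intro t
  induction t with
  | nil => intro h; simp [runs, List.zip]
  | cons x t' ih =>
    intro h
    have hlast : (h :: x :: t').getLast (List.cons_ne_nil h (x :: t'))
        = (x :: t').getLast (List.cons_ne_nil x t') := by
      simp [List.getLast]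
    by_cases hx : x = h + 1
    · -- no break between h and x: breaks(h, x::t') = breaks(x, t')
      have hbr : (List.zip (h :: x :: t') (x :: t')).filter (fun p => p.2 != p.1 + 1)
          = (List.zip (x :: t') t').filter (fun p => p.2 != p.1 + 1) := by
        simp [List.zip, hx]
      rw [show runs h h (x :: t') = runs h x t' by simp [runs, hx]]
      rw [hbr, hlast]
      cases hE : (((List.zip (x :: t') t').filter (fun p => p.2 != p.1 + 1)).map (·.1)) ++
          [(x :: t').getLast (List.cons_ne_nil x t')] with
      | nil => simp at hE
      | cons e E' =>
        refine zip_head_swap t' e h x E' _ ?_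
        rw [← hE]; exact ih x
    · -- break between h and x
      have hbr : (List.zip (h :: x :: t') (x :: t')).filter (fun p => p.2 != p.1 + 1)
          = (h, x) :: (List.zip (x :: t') t').filter (fun p => p.2 != p.1 + 1) := by
        simp [List.zip, hx]
      rw [show runs h h (x :: t') = (h, h) :: runs x x t' by simp [runs, hx]]
      rw [hbr, hlast]
      simpa [List.zip] using ih x

-- ===== VERDICT (by name: the statement is the Claim_ definition above) =====
theorem indices_to_intervals_py_spec : Claim_equal_indices_to_intervals_py := by
  intro indices _
  unfold Spec_indices_to_intervals_py indices_to_intervals_py indices_to_intervals_py_alt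
  by_cases he : indices = []
  · subst he; decide
  · have hne : PySem.List.sorted (PySem.Set.ofList indices) (fun x => x) false ≠ [] := by
      intro hs
      rw [PySem.List.sorted_eq_nil_iff] at hs
      rcases indices with _ | ⟨y, ys⟩
      · exact he rfl
      · have : y ∈ PySem.Set.ofList (y :: ys) := by
          rw [PySem.Set.mem_ofList]; simp
        simp [hs] at this
    cases hsu : PySem.List.sorted (PySem.Set.ofList indices) (fun x => x) false with
    | nil => exact absurd hsu hne
    | cons h t =>
      simp only [he, if_false]
      rw [aLoop_eq_runs, List.nil_append, ← b_eq_runs t h]
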